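-- pv_equiv track=rewrite | github.com/mammhoud/django-grep | src/django_grep/contrib/__init__.py | strip_suffixes
-- ===== SOURCE A (Python) =====
-- def strip_suffixes(word: str, suffixes: list[str]) -> str:
--     """
--     Strip specified suffixes from a word.
--
--     Never strips the entire word. Suffixes are stripped in the order provided.
--
--     Args:
--         word: Word to strip suffixes from
--         suffixes: List of suffixes to strip
--
--     Returns:
--         Word with suffixes stripped
--     """
--     if not word or not suffixes:
--         return word
--
--     for suffix in sorted(suffixes, key=len, reverse=True):
--         if word == suffix:
--             continue
--         if word.endswith(suffix):
--             word = word[: -len(suffix)]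
--             break
--
--     return word
-- ===== SOURCE B (Python) =====
-- def strip_suffixes(word: str, suffixes: list[str]) -> str:
--     """Strip the longest matching suffix from word, single pass, no sorting."""
--     if not word or not suffixes:
--         return word
--     best = None
--     for s in suffixes:
--         if s != word and word.endswith(s):
--             if best is None or len(s) > len(best):
--                 best = s
--     if best is None:
--         return word
--     return word[:-len(best)]
-- ===== Notes on version B (the rewrite author's own statement) =====
-- stated objective: simpler
-- what changed: Replaces the length-sort-then-break-on-first-match loop with a single unsorted pass that tracks the running longest matching suffix (strict '>' keeps the first among equal-length ties, matching the stable sort's winner).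
import Mathlib
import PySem

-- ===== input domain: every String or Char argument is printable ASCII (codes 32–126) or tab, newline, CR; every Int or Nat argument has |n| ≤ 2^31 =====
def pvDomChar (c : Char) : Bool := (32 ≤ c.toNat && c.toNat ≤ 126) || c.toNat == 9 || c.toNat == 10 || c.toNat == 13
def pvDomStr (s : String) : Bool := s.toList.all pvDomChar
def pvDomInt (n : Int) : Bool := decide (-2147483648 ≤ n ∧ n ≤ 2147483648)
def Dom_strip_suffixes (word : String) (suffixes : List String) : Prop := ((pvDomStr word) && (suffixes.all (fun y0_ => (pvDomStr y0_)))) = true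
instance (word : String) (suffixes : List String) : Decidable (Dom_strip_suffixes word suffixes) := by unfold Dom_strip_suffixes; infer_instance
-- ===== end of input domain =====

-- B replaces A's sort-by-length-then-break loop with a single unsorted pass that
-- tracks the running longest matching suffix (objective: simpler).

-- ===== PORT A =====
-- the for-loop over the sorted suffix list: continue on word == s, break+strip on endswith
def stripLoopA (word : String) : List String → String
  | [] => word
  | s :: rest =>
    if word == s then stripLoopA word rest
    else if PySem.Str.endswith word s then
      PySem.Str.slice word none (some (-(PySem.Str.len s)))
    else stripLoopA word rest

def strip_suffixes (word : String) (suffixes : List String) : String :=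
  if word = "" ∨ suffixes = [] then word
  else stripLoopA word (PySem.List.sorted suffixes (fun s => PySem.Str.len s) true)

-- ===== PORT B =====
-- the single-pass loop body: keep the running best (first-seen wins ties via strict >)
def stripStepB (word : String) (best : Option String) (s : String) : Option String :=
  if (s != word) && PySem.Str.endswith word s then
    match best with
    | none => some s
    | some m => if PySem.Str.len s > PySem.Str.len m then some s else some m
  else best

def strip_suffixes_alt (word : String) (suffixes : List String) : String :=
  if word = "" ∨ suffixes = [] then word
  else
    match suffixes.foldl (stripStepB word) none with
    | none => word
    | some m => PySem.Str.slice word none (some (-(PySem.Str.len m)))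

-- ===== PRECONDITION & SPEC =====
def Spec_strip_suffixes (word : String) (suffixes : List String) (out : String) : Prop := out = strip_suffixes_alt word suffixes
instance (word : String) (suffixes : List String) (out : String) : Decidable (Spec_strip_suffixes word suffixes out) := by unfold Spec_strip_suffixes; infer_instance

-- ===== CLAIM (what is proved, stated in full; the proofs are below) =====
def Claim_equal_strip_suffixes : Prop := ∀ (word : String) (suffixes : List String), Dom_strip_suffixes word suffixes → Spec_strip_suffixes word suffixes (strip_suffixes word suffixes)

-- ===== LEMMAS AND PROOFS =====

-- the match predicate shared by both analyses
def pvP (word s : String) : Bool := (s != word) && PySem.Str.endswith word s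

-- the descending-by-length comparator A's reverse sort inserts with
def pvBef (a b : String) : Bool := decide (PySem.Str.len b < PySem.Str.len a)

-- A's loop is "find the first match in the list, strip it"
theorem stripLoopA_eq_find (word : String) (L : List String) :
    stripLoopA word L =
      match L.find? (pvP word) with
      | none => word
      | some m => PySem.Str.slice word none (some (-(PySem.Str.len m))) := by
  induction L with
  | nil => rfl
  | cons s rest ih =>
    by_cases h : word = s
    · subst h
      simp [stripLoopA, pvP, ih]
    · have h' : ¬ s = word := fun e => h e.symm
      by_cases he : PySem.Chars.endswith word.toList s.toList = true
      · simp [stripLoopA, pvP, h, h', he]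
      · simp [stripLoopA, pvP, h, h', he, ih]

-- insertBy with the descending comparator preserves descending-by-length order
theorem insertBy_desc (s : String) (acc : List String)
    (h : acc.Pairwise (fun a b => PySem.Str.len b ≤ PySem.Str.len a)) :
    (PySem.List.insertBy pvBef s acc).Pairwise (fun a b => PySem.Str.len b ≤ PySem.Str.len a) := by
  induction acc with
  | nil => simp [PySem.List.insertBy]
  | cons y ys ih =>
    rw [List.pairwise_cons] at h
    by_cases hb : pvBef s y = true
    · have hsy : PySem.Str.len y < PySem.Str.len s := by
        simpa [pvBef] using hb
      rw [show PySem.List.insertBy pvBef s (y :: ys) = s :: y :: ys from by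
        simp [PySem.List.insertBy, hb]]
      refine List.pairwise_cons.2 ⟨?_, List.pairwise_cons.2 ⟨h.1, h.2⟩⟩
      intro z hz
      rcases List.mem_cons.1 hz with rfl | hz
      · omega
      · have := h.1 z hz; omega
    · have hsy : PySem.Str.len s ≤ PySem.Str.len y := by
        have : ¬ PySem.Str.len y < PySem.Str.len s := by simpa [pvBef] using hb
        omega
      rw [show PySem.List.insertBy pvBef s (y :: ys) = y :: PySem.List.insertBy pvBef s ys from by
        simp [PySem.List.insertBy, hb]]
      refine List.pairwise_cons.2 ⟨?_, ih h.2⟩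
      intro z hz
      rcases (PySem.List.mem_insertBy pvBef s z ys).1 hz with rfl | hz
      · exact hsy
      · exact h.1 z hz

-- how find? moves through one insertion into a descending list
theorem find_insertBy (word s : String) (acc : List String)
    (h : acc.Pairwise (fun a b => PySem.Str.len b ≤ PySem.Str.len a)) :
    (PySem.List.insertBy pvBef s acc).find? (pvP word) =
      match acc.find? (pvP word) with
      | none => if pvP word s then some s else none
      | some m => if pvP word s = true ∧ PySem.Str.len m < PySem.Str.len s then some s
                  else some m := by
  induction acc with
  | nil =>
    rw [show PySem.List.insertBy pvBef s ([] : List String) = [s] from rfl]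
    rw [List.find?_nil, List.find?_cons, List.find?_nil]
    cases hps : pvP word s <;> simp [hps]
  | cons y ys ih =>
    rw [List.pairwise_cons] at h
    by_cases hb : pvBef s y = true
    · have hsy : PySem.Str.len y < PySem.Str.len s := by simpa [pvBef] using hb
      rw [show PySem.List.insertBy pvBef s (y :: ys) = s :: y :: ys from by
        simp [PySem.List.insertBy, hb]]
      rw [List.find?_cons]
      cases hps : pvP word s with
      | true =>
        cases hfind : (y :: ys).find? (pvP word) with
        | none => simp [hps, hfind]
        | some m =>
          have hm := List.mem_of_find?_eq_some hfind
          have hlen : PySem.Str.len m ≤ PySem.Str.len y := by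
            rcases List.mem_cons.1 hm with rfl | hm'
            · exact le_rfl
            · exact h.1 m hm'
          have hlt : PySem.Str.len m < PySem.Str.len s := by omega
          simp only [hps, hfind]
          rw [if_pos ⟨trivial, hlt⟩]
      | false =>
        cases hfind : (y :: ys).find? (pvP word) with
        | none => simp [hps, hfind]
        | some m => simp [hps, hfind]
    · have hsy : PySem.Str.len s ≤ PySem.Str.len y := by
        have : ¬ PySem.Str.len y < PySem.Str.len s := by simpa [pvBef] using hb
        omega
      rw [show PySem.List.insertBy pvBef s (y :: ys) = y :: PySem.List.insertBy pvBef s ys from by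
        simp [PySem.List.insertBy, hb]]
      rw [List.find?_cons, List.find?_cons]
      cases hpy : pvP word y with
      | true =>
        have hno : ¬ (pvP word s = true ∧ PySem.Str.len y < PySem.Str.len s) :=
          fun hc => absurd hc.2 (by omega)
        simp only [hpy]
        rw [if_neg hno]
      | false =>
        simp only [hpy]
        exact ih h.2

-- B's loop body, phrased like find_insertBy's right-hand side
theorem stripStepB_char (word s : String) (b : Option String) :
    stripStepB word b s =
      match b with
      | none => if pvP word s then some s else none
      | some m => if pvP word s = true ∧ PySem.Str.len m < PySem.Str.len s then some s
                  else some m := by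
  cases b with
  | none => rfl
  | some m =>
    simp only [stripStepB, pvP, gt_iff_lt]
    by_cases hc : ((s != word) && PySem.Str.endswith word s) = true
    · rw [if_pos hc]
      by_cases hlt : PySem.Str.len m < PySem.Str.len s
      · rw [if_pos hlt, if_pos ⟨hc, hlt⟩]
      · rw [if_neg hlt, if_neg (fun h => hlt h.2)]
    · rw [if_neg hc, if_neg (fun h => hc h.1)]

-- the insertion-sort fold, observed through find?, is exactly B's running-best fold
theorem foldl_insert_find (word : String) (xs : List String) :
    ∀ (acc : List String) (b : Option String),
      acc.Pairwise (fun a b => PySem.Str.len b ≤ PySem.Str.len a) →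
      acc.find? (pvP word) = b →
      (xs.foldl (fun acc x => PySem.List.insertBy pvBef x acc) acc).find? (pvP word) =
        xs.foldl (stripStepB word) b := by
  induction xs with
  | nil => intro acc b _ hb; simpa using hb
  | cons s t ih =>
    intro acc b hacc hb
    simp only [List.foldl_cons]
    refine ih (PySem.List.insertBy pvBef s acc) (stripStepB word b s)
      (insertBy_desc s acc hacc) ?_
    rw [find_insertBy word s acc hacc, hb, stripStepB_char]

-- ===== VERDICT (by name: the statement is the Claim_ definition above) =====
theorem strip_suffixes_spec : Claim_equal_strip_suffixes := by
  intro word suffixes _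
  unfold Spec_strip_suffixes strip_suffixes strip_suffixes_alt
  by_cases hg : word = "" ∨ suffixes = []
  · rw [if_pos hg, if_pos hg]
  · rw [if_neg hg, if_neg hg]
    rw [stripLoopA_eq_find]
    rw [PySem.List.sorted_rev_eq_foldl_insertBy suffixes (fun s => PySem.Str.len s)]
    rw [show (fun a b : String => decide (PySem.Str.len b < PySem.Str.len a)) = pvBef from rfl]
    rw [foldl_insert_find word suffixes [] none List.Pairwise.nil (by simp)]
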